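-- pv_equiv track=rewrite | github.com/paras1810/DSA2 | DSA-main/Graph/longestConse.py | dfs
-- ===== SOURCE A (Python) =====
-- def dfs(start, longest):
--     if start not in longest:
--         return 0
--
--     if longest[start] != 0:
--         return longest[start]
--
--     current_longest = 1 + dfs(start + 1, longest)
--     longest[start] = current_longest
--     return current_longest
-- ===== SOURCE B (Python) =====
-- def dfs(start, longest):
--     # Bounded for-loop scan: the run of zero-valued consecutive keys from start
--     # has length at most len(longest), so the first stop index is found inside
--     # range(len(longest) + 1); then one arithmetic step gives the answer, and a
--     # backward fill performs the same cache writes as the original.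
--     if start not in longest:
--         return 0
--     k = len(longest)
--     for i in range(len(longest) + 1):
--         if longest.get(start + i, 1) != 0:
--             k = i
--             break
--     base = longest.get(start + k, 0)
--     for i in range(k, 0, -1):
--         longest[start + i - 1] = base + (k - i + 1)
--     return base + k
-- ===== Notes on version B (the rewrite author's own statement) =====
-- stated objective: alternative
-- what changed: Replaced the memoized recursion by a bounded for-loop scan over range(len(longest)+1) that finds the first index where the zero-valued run stops (using the pigeonhole bound that the run is at most len(longest) long), then returns base+k arithmetically and performs the same cache writes with a backward fill loop.
import Mathlib
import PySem

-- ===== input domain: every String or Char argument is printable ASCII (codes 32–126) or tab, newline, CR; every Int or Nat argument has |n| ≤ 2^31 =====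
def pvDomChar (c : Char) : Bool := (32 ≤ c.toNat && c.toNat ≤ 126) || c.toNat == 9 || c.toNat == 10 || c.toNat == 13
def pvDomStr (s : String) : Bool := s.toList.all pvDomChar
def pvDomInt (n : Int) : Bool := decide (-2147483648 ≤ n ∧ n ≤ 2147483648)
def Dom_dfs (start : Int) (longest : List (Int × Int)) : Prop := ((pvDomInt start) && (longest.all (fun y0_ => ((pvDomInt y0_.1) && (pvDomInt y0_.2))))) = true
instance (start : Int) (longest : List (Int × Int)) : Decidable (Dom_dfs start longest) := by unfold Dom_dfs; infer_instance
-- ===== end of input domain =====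

-- B replaces A's memoized recursion by a bounded for-loop scan (first stop index in range(len+1)) plus one arithmetic step; return values proved equal; in Python both mutate the dict identically, the theorems here are about the return value.


-- two termination helpers cited by name in port A's decreasing_by: a successful
-- lookup means the key is present, and stepping start → start+1 strictly shrinks
-- the number of entries with key ≥ start
theorem pv_lookup_mem (node v : Int) (longest : List (Int × Int))
    (h : List.lookup node longest = some v) : (node, v) ∈ longest := by
  induction longest with
  | nil => simp [List.lookup] at h
  | cons p rest ih =>
    rw [List.lookup_cons] at h
    by_cases he : node == p.1
    · obtain ⟨a, b⟩ := p
      simp at he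
      simp [he] at h
      simp [he, h]
    · simp [he] at h
      exact List.mem_cons_of_mem _ (ih h)

theorem pv_filter_ge_lt (start : Int) (l : List (Int × Int)) (v : Int)
    (hmem : (start, v) ∈ l) :
    (l.filter (fun p => decide (start + 1 ≤ p.1))).length
      < (l.filter (fun p => decide (start ≤ p.1))).length := by
  have hle : ∀ (r : List (Int × Int)),
      (r.filter (fun p => decide (start + 1 ≤ p.1))).length
        ≤ (r.filter (fun p => decide (start ≤ p.1))).length := by
    intro r
    simp only [← List.countP_eq_length_filter]
    apply List.countP_mono_left
    intro x _ hx; simp only [decide_eq_true_eq] at hx ⊢; omega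
  induction l with
  | nil => cases hmem
  | cons p rest ih =>
    rcases List.mem_cons.mp hmem with h | h
    · rw [List.filter_cons_of_neg (by simp [← h]),
          List.filter_cons_of_pos (by simp [← h])]
      exact Nat.lt_succ_of_le (hle rest)
    · have hih := ih h
      by_cases h1 : start + 1 ≤ p.1
      · rw [List.filter_cons_of_pos (by simpa using h1),
            List.filter_cons_of_pos (by simp only [decide_eq_true_eq]; omega)]
        simpa using Nat.succ_lt_succ hih
      · by_cases h2 : start ≤ p.1
        · rw [List.filter_cons_of_neg (by simpa using h1),
              List.filter_cons_of_pos (by simpa using h2)]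
          exact Nat.lt_succ_of_lt hih
        · rw [List.filter_cons_of_neg (by simpa using h1),
              List.filter_cons_of_neg (by simpa using h2)]
          exact hih

-- ===== PORT A =====
-- literal port of A's recursion ('start not in longest' → lookup none; 'longest[start] != 0' → v ≠ 0;
-- A's post-recursion write longest[start] = current_longest mutates a key the rest of the
-- computation never reads, so the returned value is exactly this recursion)
def dfs (start : Int) (longest : List (Int × Int)) : Int :=
  match h : List.lookup start longest with
  | none => 0
  | some v => if v ≠ 0 then v else 1 + dfs (start + 1) longest
termination_by (longest.filter (fun p => decide (start ≤ p.1))).length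
decreasing_by
  exact pv_filter_ge_lt start longest v (pv_lookup_mem start v longest h)

-- ===== PORT B =====
-- Source B: 'start not in longest' → lookup none; the for-loop over range(len(longest)+1)
-- with break is find? over List.range, with k's initialisation len(longest) as the
-- (unreachable) no-break default; 'longest.get(key, default)' → (List.lookup key …).getD default;
-- the backward fill loop only writes to the dict (never read afterwards), so the
-- returned value is exactly base + k
def dfs_alt (start : Int) (longest : List (Int × Int)) : Int :=
  match List.lookup start longest with
  | none => 0
  | some _ =>
    let k : Nat :=
      ((List.range (longest.length + 1)).find?
        (fun (i : Nat) => ((List.lookup (start + (i : Int)) longest).getD 1) != 0)).getD longest.length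
    let base : Int := (List.lookup (start + (k : Int)) longest).getD 0
    base + (k : Int)

-- ===== PRECONDITION & SPEC =====
def Spec_dfs (start : Int) (longest : List (Int × Int)) (out : Int) : Prop := out = dfs_alt start longest
instance (start : Int) (longest : List (Int × Int)) (out : Int) : Decidable (Spec_dfs start longest out) := by unfold Spec_dfs; infer_instance

-- ===== CLAIM (what is proved, stated in full; the proofs are below) =====
def Claim_equal_dfs : Prop := ∀ (start : Int) (longest : List (Int × Int)), Dom_dfs start longest → Spec_dfs start longest (dfs start longest)

-- ===== LEMMAS AND PROOFS =====

-- proof-only helper: the forward walk A's recursion performs, as (stop node, visited nodes)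
def dfsWalk (node : Int) (longest : List (Int × Int)) : Int × List Int :=
  match h : List.lookup node longest with
  | some v =>
    if v = 0 then
      let r := dfsWalk (node + 1) longest
      (r.1, node :: r.2)
    else (node, [])
  | none => (node, [])
termination_by (longest.filter (fun p => decide (node ≤ p.1))).length
decreasing_by
  exact pv_filter_ge_lt node longest v (pv_lookup_mem node v longest h)

theorem pv_dfsWalk_none (node : Int) (longest : List (Int × Int))
    (h : List.lookup node longest = none) : dfsWalk node longest = (node, []) := by
  rw [dfsWalk]; split <;> simp_all

theorem pv_dfsWalk_pos (node v : Int) (longest : List (Int × Int))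
    (h : List.lookup node longest = some v) (hv : v ≠ 0) :
    dfsWalk node longest = (node, []) := by
  rw [dfsWalk]; split <;> simp_all

theorem pv_dfsWalk_zero (node : Int) (longest : List (Int × Int))
    (h : List.lookup node longest = some 0) :
    dfsWalk node longest
      = ((dfsWalk (node + 1) longest).1, node :: (dfsWalk (node + 1) longest).2) := by
  rw [dfsWalk]; split <;> simp_all

theorem pv_dfs_eq_walk (start : Int) (longest : List (Int × Int)) :
    dfs start longest
      = (List.lookup (dfsWalk start longest).1 longest).getD 0
          + (dfsWalk start longest).2.length := by
  fun_induction dfs start longest with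
  | case1 start h =>
    rw [pv_dfsWalk_none start longest h]
    simp [h]
  | case2 start v h hv =>
    rw [pv_dfsWalk_pos start v longest h (by simpa using hv)]
    simp [h]
  | case3 start v h hv ih =>
    have hv0 : v = 0 := by simpa using hv
    subst hv0
    rw [pv_dfsWalk_zero start longest h]
    simp only [List.length_cons]
    rw [ih]
    push_cast
    ring

-- the walk stops at start + length, at a node whose cached value is not 0,
-- and every visited node has cached value 0
theorem pv_walk_stop (start : Int) (longest : List (Int × Int)) :
    (dfsWalk start longest).1 = start + ((dfsWalk start longest).2.length : Int)
    ∧ List.lookup (dfsWalk start longest).1 longest ≠ some 0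
    ∧ ∀ i : Nat, i < (dfsWalk start longest).2.length →
        List.lookup (start + (i : Int)) longest = some 0 := by
  fun_induction dfsWalk start longest with
  | case1 node r h ih =>
    obtain ⟨ih1, ih2, ih3⟩ := ih
    have hr : r = dfsWalk (node + 1) longest := rfl
    rw [hr]
    refine ⟨?_, by simpa using ih2, ?_⟩
    · simp only [List.length_cons]
      push_cast
      omega
    · intro i hi
      cases i with
      | zero => simpa using h
      | succ j =>
        have := ih3 j (by simpa using hi)
        have heq : node + ((j + 1 : Nat) : Int) = node + 1 + (j : Int) := by push_cast; ring
        rw [heq]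
        exact this
  | case2 node v h hv => simp_all
  | case3 node h =>
    refine ⟨by simp, ?_, by simp⟩
    intro hc
    rw [h] at hc
    simp at hc

-- pigeonhole: the visited nodes are distinct keys of longest with value 0,
-- so the walk length is at most the number of entries
theorem pv_walk_len_le (start : Int) (longest : List (Int × Int)) :
    (dfsWalk start longest).2.length ≤ longest.length := by
  obtain ⟨-, -, h3⟩ := pv_walk_stop start longest
  set L := (dfsWalk start longest).2.length with hL
  have hsub : (List.range L).map (fun (i : Nat) => ((start + (i : Int)), (0 : Int))) ⊆ longest := by
    intro x hx
    simp only [List.mem_map, List.mem_range] at hx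
    obtain ⟨i, hi, rfl⟩ := hx
    exact pv_lookup_mem _ _ _ (h3 i hi)
  have hnodup : ((List.range L).map (fun (i : Nat) => ((start + (i : Int)), (0 : Int)))).Nodup := by
    refine List.Nodup.map ?_ (List.nodup_range)
    intro a b hab
    have : (a : Int) = b := by
      have := congrArg Prod.fst hab
      simpa using this
    exact_mod_cast this
  have := (hnodup.subperm hsub).length_le
  simpa using this

-- find? over range returns the least index satisfying the predicate
theorem pv_find_range_eq (p : Nat → Bool) (k n : Nat) (hk : k < n)
    (hpk : p k = true) (hlt : ∀ i, i < k → p i = false) :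
    (List.range n).find? p = some k := by
  induction k generalizing p n with
  | zero =>
    cases n with
    | zero => omega
    | succ m =>
      rw [List.range_succ_eq_map]
      simp [List.find?_cons_of_pos, hpk]
  | succ j ih =>
    cases n with
    | zero => omega
    | succ m =>
      rw [List.range_succ_eq_map]
      rw [List.find?_cons_of_neg (by simp [hlt 0 (Nat.succ_pos j)])]
      rw [List.find?_map]
      have hrec : (List.range m).find? (p ∘ Nat.succ) = some j := by
        apply ih
        · omega
        · simpa using hpk
        · intro i hi; exact hlt (i + 1) (by omega)
      simp [hrec]

-- ===== VERDICT (by name: the statement is the Claim_ definition above) =====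
theorem dfs_spec : Claim_equal_dfs := by
  intro start longest _
  unfold Spec_dfs dfs_alt
  cases h : List.lookup start longest with
  | none =>
    rw [pv_dfs_eq_walk, pv_dfsWalk_none start longest h]
    simp [h]
  | some v =>
    simp only []
    obtain ⟨hstop, hne, hzero⟩ := pv_walk_stop start longest
    set L := (dfsWalk start longest).2.length with hL
    have hfind : (List.range (longest.length + 1)).find?
        (fun (i : Nat) => ((List.lookup (start + (i : Int)) longest).getD 1) != 0) = some L := by
      apply pv_find_range_eq
      · exact Nat.lt_succ_of_le (pv_walk_len_le start longest)
      · rw [hstop] at hne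
        cases hc : List.lookup (start + (L : Int)) longest with
        | none => simp
        | some w =>
          have hw : w ≠ 0 := fun hw => hne (by rw [hc, hw])
          simp [hw]
      · intro i hi
        rw [hzero i hi]
        simp
    rw [pv_dfs_eq_walk, hfind]
    simp only [Option.getD_some]
    rw [← hstop]
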